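-- pv_equiv track=rewrite | github.com/weronika313/REST_chess_solver | models.py | get_right_up_diagonal_moves
-- ===== SOURCE A (Python) =====
-- from typing import List
--
-- def get_right_up_diagonal_moves(
--         current_row_number: int, current_column_number: int
-- ) -> List[str]:
--     list_of_available_moves: List[str] = []
--     column = current_column_number  # type: int
--     search_depth_min = column + 1  # type: int
--     search_depth_max = 9  # type: int
--     row = current_row_number + 1  # type: int
--
--     for column in range(search_depth_min, search_depth_max):
--         list_of_available_moves.append(get_square_index(column, row))
--         row = row + 1
--         if row > 8:
--             break
--
--     return list_of_available_moves
--
-- def get_square_index(column_number: int, row_number: int) -> str: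
--     column_letter = chr(column_number + 64)  # type: str
--     square_index = column_letter + str(row_number)  # type: str
--
--     return square_index
-- ===== SOURCE B (Python) =====
-- from typing import List
--
-- def get_right_up_diagonal_moves(
--         current_row_number: int, current_column_number: int
-- ) -> List[str]:
--     column = current_column_number + 1
--     row = current_row_number + 1
--     if column > 8 or row > 8:
--         return []
--     return [get_square_index(column, row)] + get_right_up_diagonal_moves(row, column)
--
-- def get_square_index(column_number: int, row_number: int) -> str:
--     column_letter = chr(column_number + 64)  # type: str
--     square_index = column_letter + str(row_number)  # type: str
--
--     return square_index
-- ===== Notes on version B (the rewrite author's own statement) =====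
-- stated objective: alternative
-- what changed: A's column-range loop with an accumulator list, an incremental row counter and a mid-loop break is replaced by direct structural recursion along the diagonal: each call checks the board bound once, emits the next square and recurses on the advanced position, with no loop, no accumulator and no break.
-- intended difference: When current_row_number >= 8 and current_column_number <= 7, A still appends one square on row current_row_number+1 > 8 (e.g. 'B9') before its break fires, an off-board move; B returns [] there, which is the intended set of available board moves. — e.g. on get_right_up_diagonal_moves(8, 1): A returns ["B9"], B returns []
import Mathlib
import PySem

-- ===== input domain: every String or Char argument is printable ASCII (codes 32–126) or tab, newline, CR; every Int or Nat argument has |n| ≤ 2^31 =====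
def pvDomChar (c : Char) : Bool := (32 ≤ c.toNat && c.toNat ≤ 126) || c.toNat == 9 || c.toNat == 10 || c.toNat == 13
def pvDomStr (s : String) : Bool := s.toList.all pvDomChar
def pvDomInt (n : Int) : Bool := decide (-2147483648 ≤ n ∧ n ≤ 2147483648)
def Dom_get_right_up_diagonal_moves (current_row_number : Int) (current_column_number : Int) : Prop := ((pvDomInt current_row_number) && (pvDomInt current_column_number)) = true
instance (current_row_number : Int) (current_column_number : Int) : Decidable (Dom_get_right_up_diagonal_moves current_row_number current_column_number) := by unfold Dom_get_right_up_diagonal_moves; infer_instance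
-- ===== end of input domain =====

-- B replaces A's column-range loop (accumulator, incremental row counter, mid-loop break)
-- by direct structural recursion along the diagonal ("alternative" objective);
-- on current_row_number ≥ 8 it drops A's off-board square (see D_ below).

-- ===== PORT A =====
-- get_square_index, shared helper of both Pythons. chr is ported by hand as
-- Char.ofNat of the code, exact because on Pre_ the code lies in [0, 72];
-- the concatenation chr(..) + str(row) is built on the char-list side (PySem.Int.toChars = str).
def get_square_index (column_number : Int) (row_number : Int) : String :=
  String.ofList (Char.ofNat (column_number + 64).toNat :: PySem.Int.toChars row_number)

-- the 'for column in range(column+1, 9)' loop with its early 'if row > 8: break'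
def pvALoop : List Int → Int → List String → List String
  | [], _, acc => acc
  | column :: rest, row, acc =>
    let acc' := acc ++ [get_square_index column row]
    if row + 1 > 8 then acc' else pvALoop rest (row + 1) acc'

def get_right_up_diagonal_moves (current_row_number : Int) (current_column_number : Int) : List String :=
  pvALoop (PySem.List.pyRange (current_column_number + 1) 9 1) (current_row_number + 1) []

-- ===== PORT B =====
-- B's structural recursion along the diagonal; terminates because the column advances
-- towards the bound 8 on every recursive call.
def get_right_up_diagonal_moves_alt (current_row_number : Int) (current_column_number : Int) : List String :=
  let column := current_column_number + 1
  let row := current_row_number + 1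
  if column > 8 ∨ row > 8 then []
  else [get_square_index column row] ++ get_right_up_diagonal_moves_alt row column
termination_by (8 - current_column_number).toNat
decreasing_by
  simp only [not_or, not_lt] at *
  omega

-- ===== PRECONDITION & SPEC =====
-- Pre_ excludes exactly the inputs where A raises: for current_column_number ≤ -66 the
-- first loop iteration calls chr on a negative code (ValueError).
def Pre_get_right_up_diagonal_moves (current_row_number : Int) (current_column_number : Int) : Prop :=
  -65 ≤ current_column_number
instance (current_row_number : Int) (current_column_number : Int) : Decidable (Pre_get_right_up_diagonal_moves current_row_number current_column_number) := by unfold Pre_get_right_up_diagonal_moves; infer_instance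
def pvWitness_get_right_up_diagonal_moves : Int × Int := (2, 2)

-- When current_row_number ≥ 8 and current_column_number ≤ 7, A appends one square on row
-- current_row_number + 1 > 8 (e.g. "B9") before its break fires — an off-board move —
-- while B returns [], the intended (empty) set of available board moves.
def D_get_right_up_diagonal_moves (current_row_number : Int) (current_column_number : Int) : Prop :=
  8 ≤ current_row_number ∧ current_column_number ≤ 7
instance (current_row_number : Int) (current_column_number : Int) : Decidable (D_get_right_up_diagonal_moves current_row_number current_column_number) := by unfold D_get_right_up_diagonal_moves; infer_instance

def Spec_get_right_up_diagonal_moves (current_row_number : Int) (current_column_number : Int) (out : List String) : Prop := ¬ D_get_right_up_diagonal_moves current_row_number current_column_number → out = get_right_up_diagonal_moves_alt current_row_number current_column_number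
instance (current_row_number : Int) (current_column_number : Int) (out : List String) : Decidable (Spec_get_right_up_diagonal_moves current_row_number current_column_number out) := by unfold Spec_get_right_up_diagonal_moves; infer_instance

def pvDiffWitness_get_right_up_diagonal_moves : Int × Int := (8, 1)
def pvDiffWitnessOut_get_right_up_diagonal_moves : (List String) × (List String) := (["B9"], [])

-- ===== CLAIM (what is proved, stated in full; the proofs are below) =====
def Claim_unchanged_get_right_up_diagonal_moves : Prop := ∀ (current_row_number : Int) (current_column_number : Int), Dom_get_right_up_diagonal_moves current_row_number current_column_number → Pre_get_right_up_diagonal_moves current_row_number current_column_number → Spec_get_right_up_diagonal_moves current_row_number current_column_number (get_right_up_diagonal_moves current_row_number current_column_number)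
def Claim_changed_get_right_up_diagonal_moves : Prop := Dom_get_right_up_diagonal_moves (pvDiffWitness_get_right_up_diagonal_moves.1) (pvDiffWitness_get_right_up_diagonal_moves.2) ∧ Pre_get_right_up_diagonal_moves (pvDiffWitness_get_right_up_diagonal_moves.1) (pvDiffWitness_get_right_up_diagonal_moves.2) ∧ D_get_right_up_diagonal_moves (pvDiffWitness_get_right_up_diagonal_moves.1) (pvDiffWitness_get_right_up_diagonal_moves.2) ∧ get_right_up_diagonal_moves (pvDiffWitness_get_right_up_diagonal_moves.1) (pvDiffWitness_get_right_up_diagonal_moves.2) = pvDiffWitnessOut_get_right_up_diagonal_moves.1 ∧ get_right_up_diagonal_moves_alt (pvDiffWitness_get_right_up_diagonal_moves.1) (pvDiffWitness_get_right_up_diagonal_moves.2) = pvDiffWitnessOut_get_right_up_diagonal_moves.2 ∧ pvDiffWitnessOut_get_right_up_diagonal_moves.1 ≠ pvDiffWitnessOut_get_right_up_diagonal_moves.2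
def Claim_exact_get_right_up_diagonal_moves : Prop := ∀ (current_row_number : Int) (current_column_number : Int), Dom_get_right_up_diagonal_moves current_row_number current_column_number → Pre_get_right_up_diagonal_moves current_row_number current_column_number → D_get_right_up_diagonal_moves current_row_number current_column_number → get_right_up_diagonal_moves current_row_number current_column_number ≠ get_right_up_diagonal_moves_alt current_row_number current_column_number

-- ===== LEMMAS AND PROOFS =====

-- A's loop, started at column c+1 and row r+1 with r ≤ 7 ∨ 8 ≤ c (i.e. outside D_),
-- appends exactly what B's recursion from (r, c) produces.
theorem pvALoop_eq_alt (n : Nat) (r c : Int) (acc : List String)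
    (hn : (8 - c).toNat ≤ n) (h : r ≤ 7 ∨ 8 ≤ c) :
    pvALoop (PySem.List.pyRange (c + 1) 9 1) (r + 1) acc
      = acc ++ get_right_up_diagonal_moves_alt r c := by
  induction n generalizing r c acc with
  | zero =>
    have hc : 8 ≤ c := by omega
    have hempty : PySem.List.pyRange (c + 1) 9 1 = [] := by
      rw [PySem.List.pyRange_one]
      have : (9 - (c + 1)).toNat = 0 := by omega
      simp [this]
    rw [hempty, get_right_up_diagonal_moves_alt]
    simp [pvALoop, show c + 1 > 8 from by omega]
  | succ k ih =>
    by_cases hc : 8 ≤ c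
    · have hempty : PySem.List.pyRange (c + 1) 9 1 = [] := by
        rw [PySem.List.pyRange_one]
        have : (9 - (c + 1)).toNat = 0 := by omega
        simp [this]
      rw [hempty, get_right_up_diagonal_moves_alt]
      simp [pvALoop, show c + 1 > 8 from by omega]
    · have hr : r ≤ 7 := by omega
      rw [PySem.List.pyRange_one_cons (by omega : c + 1 < 9)]
      show (if r + 1 + 1 > 8 then acc ++ [get_square_index (c+1) (r+1)]
            else pvALoop (PySem.List.pyRange (c+1+1) 9 1) (r+1+1) (acc ++ [get_square_index (c+1) (r+1)]))
           = acc ++ get_right_up_diagonal_moves_alt r c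
      rw [get_right_up_diagonal_moves_alt]
      rw [if_neg (show ¬(c + 1 > 8 ∨ r + 1 > 8) from by omega)]
      by_cases h8 : r = 7
      · subst h8
        rw [if_pos (by omega)]
        rw [get_right_up_diagonal_moves_alt,
            if_pos (Or.inr (show (7:Int) + 1 + 1 > 8 from by omega))]
        simp
      · rw [if_neg (by omega)]
        rw [ih (r + 1) (c + 1) (acc ++ [get_square_index (c+1) (r+1)]) (by omega) (by omega)]
        simp

theorem get_right_up_diagonal_moves_spec : Claim_unchanged_get_right_up_diagonal_moves := by
  intro cr col _ _ hnd
  unfold get_right_up_diagonal_moves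
  have h : cr ≤ 7 ∨ 8 ≤ col := by
    by_contra hcon
    exact hnd ⟨by omega, by omega⟩
  simpa using pvALoop_eq_alt (8 - col).toNat cr col [] (le_refl _) h

theorem get_right_up_diagonal_moves_changed : Claim_changed_get_right_up_diagonal_moves := by
  unfold Claim_changed_get_right_up_diagonal_moves
  refine ⟨by decide, by decide, by decide, by decide, ?_, by decide⟩
  rw [show pvDiffWitness_get_right_up_diagonal_moves = ((8:Int), (1:Int)) from rfl]
  rw [get_right_up_diagonal_moves_alt]
  simp [pvDiffWitnessOut_get_right_up_diagonal_moves]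

theorem get_right_up_diagonal_moves_tight : Claim_exact_get_right_up_diagonal_moves := by
  intro cr col _ hpre hd
  obtain ⟨h1, h2⟩ := hd
  unfold get_right_up_diagonal_moves
  rw [get_right_up_diagonal_moves_alt,
      if_pos (by omega : col + 1 > 8 ∨ cr + 1 > 8),
      PySem.List.pyRange_one_cons (by omega : col + 1 < 9)]
  show (if cr + 1 + 1 > 8 then _ else _) ≠ _
  rw [if_pos (by omega)]
  simp
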